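-- pv_equiv track=rewrite | github.com/vlad-marlo/algorithms | school/mr/statgrad/eight.py | check
-- ===== SOURCE A (Python) =====
-- EVEN = '02468'
--
-- def check(s: str) -> bool:
--     if s[0] == '0':
--         return False
--     _c_odd = sum(s.count(i) for i in EVEN)
--
--     for i in range(len(s) - 1):
--         a, b = s[i], s[i + 1]
--         if a not in EVEN and b not in EVEN:
--             return False
--     return _c_odd == 3
-- ===== SOURCE B (Python) =====
-- EVEN = '02468'
--
-- def check(s: str) -> bool:
--     if s[0] == '0':
--         return False
--     count = 0
--     prev_odd = False
--     for ch in s: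
--         if ch in EVEN:
--             count += 1
--             prev_odd = False
--         else:
--             if prev_odd:
--                 return False
--             prev_odd = True
--     return count == 3
-- ===== Notes on version B (the rewrite author's own statement) =====
-- stated objective: simpler
-- what changed: Replaces the five s.count scans plus a separate index-based adjacency loop by one single pass over the characters maintaining an even-count and a previous-char-was-odd flag.
import Mathlib
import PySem

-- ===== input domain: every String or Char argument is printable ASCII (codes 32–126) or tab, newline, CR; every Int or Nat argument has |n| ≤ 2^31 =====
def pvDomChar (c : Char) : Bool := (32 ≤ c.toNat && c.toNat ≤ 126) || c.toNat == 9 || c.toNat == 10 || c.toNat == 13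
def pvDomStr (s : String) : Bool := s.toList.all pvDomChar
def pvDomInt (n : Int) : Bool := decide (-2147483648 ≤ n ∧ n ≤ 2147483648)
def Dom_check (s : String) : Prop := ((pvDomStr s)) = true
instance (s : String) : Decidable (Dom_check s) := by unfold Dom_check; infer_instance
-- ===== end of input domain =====

-- B replaces A's five s.count scans plus separate indexed adjacency loop by one
-- single pass keeping an even-count and a previous-char-was-odd flag (objective: simpler).

-- ===== PORT A =====
-- EVEN = '02468'
def pvEVEN : List Char := "02468".toList

-- 'for i in range(len(s)-1): ... return False' with s[i], s[i+1]; early return = stop with false.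
-- 'a in EVEN' for a single character a is exactly character membership in '02468'.
def checkAdjA (l : List Char) : List Int → Bool
  | [] => true
  | i :: rest =>
    match PySem.List.pyGet? l i, PySem.List.pyGet? l (i + 1) with
    | some a, some b =>
      if !pvEVEN.contains a && !pvEVEN.contains b then false else checkAdjA l rest
    | _, _ => false      -- unreachable: range indices are in bounds

def check (s : String) : Bool :=
  match PySem.Str.pyGet? s 0 with
  | none => false        -- Python raises IndexError on '' ; excluded by Pre_check
  | some c0 =>
    if c0 = '0' then false
    else
      let l := s.toList
      -- _c_odd = sum(s.count(i) for i in EVEN); s.count of a 1-char string is character count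
      let cOdd : Int := (pvEVEN.map (fun c => (PySem.List.count l c : Int))).sum
      if checkAdjA l (PySem.List.pyRange 0 ((l.length : Int) - 1) 1) then cOdd == 3 else false

-- ===== PORT B =====
def loopB : List Char → Int → Bool → Bool
  | [], count, _ => count == 3
  | ch :: rest, count, prevOdd =>
    if pvEVEN.contains ch then loopB rest (count + 1) false
    else if prevOdd then false
    else loopB rest count true

def check_alt (s : String) : Bool :=
  match PySem.Str.pyGet? s 0 with
  | none => false        -- Python B raises IndexError on '' ; excluded by Pre_check
  | some c0 => if c0 = '0' then false else loopB s.toList 0 false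

-- ===== PRECONDITION & SPEC =====
-- A (and B) evaluate s[0] first and raise IndexError on the empty string; Pre_ excludes exactly it.
def Pre_check (s : String) : Prop := s ≠ ""
instance (s : String) : Decidable (Pre_check s) := by unfold Pre_check; infer_instance
def pvWitness_check : String := "123"

def Spec_check (s : String) (out : Bool) : Prop := out = check_alt s
instance (s : String) (out : Bool) : Decidable (Spec_check s out) := by unfold Spec_check; infer_instance

-- ===== CLAIM (what is proved, stated in full; the proofs are below) =====
def Claim_equal_check : Prop := ∀ (s : String), Dom_check s → Pre_check s → Spec_check s (check s)

-- ===== LEMMAS AND PROOFS =====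

-- no two adjacent non-even characters (structural form of A's indexed loop)
def adjOK : List Char → Bool
  | [] => true
  | [_] => true
  | a :: b :: t =>
    if !pvEVEN.contains a && !pvEVEN.contains b then false else adjOK (b :: t)

-- A's count: the map-sum of per-character counts is countP membership in pvEVEN
theorem sum_ite_one (x : Char) : ∀ (E : List Char), E.Nodup →
    (E.map (fun c => if c == x then (1 : Int) else 0)).sum
      = if E.contains x then 1 else 0 := by
  intro E
  induction E with
  | nil => simp
  | cons e E ih =>
    intro h
    rcases List.nodup_cons.mp h with ⟨he, hE⟩
    simp only [List.map_cons, List.sum_cons, ih hE, List.contains_cons]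
    by_cases hex : e = x
    · subst hex
      have hc : E.contains e = false := by simpa using he
      simp [hc]
      exact he
    · have hbe : (e == x) = false := by simp [hex]
      have hxe : ¬ x = e := fun h => hex h.symm
      simp [hbe, hxe]

theorem countA_eq (l : List Char) :
    (pvEVEN.map (fun c => (PySem.List.count l c : Int))).sum
      = (l.countP (fun c => pvEVEN.contains c) : Int) := by
  induction l with
  | nil => simp [PySem.List.count]
  | cons x t ih =>
    have hn : pvEVEN.Nodup := by decide
    have hmap : (pvEVEN.map (fun c => (PySem.List.count (x :: t) c : Int)))
        = pvEVEN.map (fun c =>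
            (PySem.List.count t c : Int) + (if c == x then (1 : Int) else 0)) := by
      refine congrArg (fun f => List.map f pvEVEN) ?_
      funext c
      simp only [PySem.List.count_eq, List.count_cons]
      by_cases h : c = x
      · subst h; simp
      · have h1 : (x == c) = false := by simp [Ne.symm h]
        have h2 : (c == x) = false := by simp [h]
        simp [h1, h2]
    rw [hmap, PySem.List.sum_map_add_int, ih, sum_ite_one x pvEVEN hn, List.countP_cons]
    by_cases h : pvEVEN.contains x <;> simp [h] <;> push_cast <;> ring

-- A's indexed adjacency loop is trivially true once fewer than two characters remain
theorem adjA_short (l : List Char) (k : Nat) (h : ¬ ((k : Int) < (l.length : Int) - 1)) :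
    checkAdjA l (PySem.List.pyRange (k : Int) ((l.length : Int) - 1)) = adjOK (l.drop k) := by
  have h1 : ((l.length : Int) - 1 - (k : Int)).toNat = 0 := by omega
  rw [PySem.List.pyRange_one, h1]
  simp only [List.range_zero, List.map_nil]
  have hOK : adjOK (l.drop k) = true := by
    have hlen : (l.drop k).length ≤ 1 := by
      rw [List.length_drop]; omega
    rcases hdk : l.drop k with _ | ⟨a, t⟩
    · simp [adjOK]
    · rw [hdk] at hlen
      cases t with
      | nil => simp [adjOK]
      | cons b t' => simp at hlen
  simp [checkAdjA, hOK]

-- A's indexed adjacency loop equals the structural adjOK on the dropped suffix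
theorem adjA_drop (l : List Char) : ∀ (k : Nat),
    checkAdjA l (PySem.List.pyRange (k : Int) ((l.length : Int) - 1)) = adjOK (l.drop k) := by
  intro k
  induction hd : l.length - k generalizing k with
  | zero =>
    exact adjA_short l k (by omega)
  | succ m ih =>
    by_cases h1 : (k : Int) < (l.length : Int) - 1
    · have hk1 : k + 1 < l.length := by omega
      have hk : k < l.length := by omega
      rw [PySem.List.pyRange_one_cons h1]
      have g1 : PySem.List.pyGet? l (k : Int) = some l[k] := by
        rw [PySem.List.pyGet?_natCast]
        exact List.getElem?_eq_getElem hk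
      have g2 : PySem.List.pyGet? l ((k : Int) + 1) = some l[k + 1] := by
        have harg : ((k : Int) + 1) = ((k + 1 : Nat) : Int) := by push_cast; ring
        rw [harg, PySem.List.pyGet?_natCast]
        exact List.getElem?_eq_getElem hk1
      have hdrop : l.drop k = l[k] :: l.drop (k + 1) := List.drop_eq_getElem_cons hk
      have hdrop1 : l.drop (k + 1) = l[k + 1] :: l.drop (k + 2) := List.drop_eq_getElem_cons hk1
      have hrec : checkAdjA l (PySem.List.pyRange ((k : Int) + 1) ((l.length : Int) - 1))
          = adjOK (l.drop (k + 1)) := by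
        have harg : ((k : Int) + 1) = ((k + 1 : Nat) : Int) := by push_cast; ring
        rw [harg]
        exact ih (k + 1) (by omega)
      rw [show checkAdjA l ((k : Int) :: PySem.List.pyRange ((k : Int) + 1) ((l.length : Int) - 1))
            = (match PySem.List.pyGet? l (k : Int), PySem.List.pyGet? l ((k : Int) + 1) with
               | some a, some b =>
                 if !pvEVEN.contains a && !pvEVEN.contains b then false
                 else checkAdjA l (PySem.List.pyRange ((k : Int) + 1) ((l.length : Int) - 1))
               | _, _ => false) from rfl]
      rw [g1, g2]
      show (if !pvEVEN.contains l[k] && !pvEVEN.contains l[k + 1] then false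
            else checkAdjA l (PySem.List.pyRange ((k : Int) + 1) ((l.length : Int) - 1)))
          = adjOK (l.drop k)
      rw [hrec, hdrop, hdrop1, adjOK]
    · exact adjA_short l k h1

-- head of l is non-even (for relating the prev-odd flag to adjOK)
def headOdd : List Char → Bool
  | [] => false
  | x :: _ => !pvEVEN.contains x

-- flagged structural adjacency check, matching loopB's control flow
def adjOKf : List Char → Bool → Bool
  | [], _ => true
  | x :: t, p =>
    if pvEVEN.contains x then adjOKf t false
    else if p then false else adjOKf t true

theorem adjOK_cons2 (a b : Char) (t : List Char) :
    adjOK (a :: b :: t)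
      = if !pvEVEN.contains a && !pvEVEN.contains b then false else adjOK (b :: t) := rfl

theorem adjOKf_cons (x : Char) (t : List Char) (p : Bool) :
    adjOKf (x :: t) p
      = if pvEVEN.contains x then adjOKf t false
        else if p then false else adjOKf t true := rfl

theorem loopB_cons (ch : Char) (t : List Char) (c : Int) (p : Bool) :
    loopB (ch :: t) c p
      = if pvEVEN.contains ch then loopB t (c + 1) false
        else if p then false else loopB t c true := rfl

theorem adjOKf_eq (l : List Char) : ∀ p, adjOKf l p = (adjOK l && !(p && headOdd l)) := by
  induction l with
  | nil => intro p; simp [adjOKf, adjOK, headOdd]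
  | cons x t ih =>
    intro p
    rw [adjOKf_cons]
    cases hx : pvEVEN.contains x with
    | true =>
      rw [if_pos rfl, ih false]
      have hOK : adjOK (x :: t) = adjOK t := by
        cases t with
        | nil => rfl
        | cons b t' =>
          rw [adjOK_cons2, hx]
          rfl
      rw [hOK]
      have hh : headOdd (x :: t) = false := by simp only [headOdd]; rw [hx]; rfl
      rw [hh]
      simp
    | false =>
      rw [if_neg (by simp [hx])]
      have hh : headOdd (x :: t) = true := by simp only [headOdd]; rw [hx]; rfl
      cases p with
      | true =>
        rw [if_pos rfl, hh]
        simp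
      | false =>
        rw [if_neg (by simp), ih true, hh]
        have hx' : adjOK (x :: t) = (adjOK t && !headOdd t) := by
          cases t with
          | nil => rfl
          | cons b t' =>
            rw [adjOK_cons2, hx]
            show (if !pvEVEN.contains b then false else adjOK (b :: t'))
                = (adjOK (b :: t') && !headOdd (b :: t'))
            cases hb : pvEVEN.contains b with
            | true =>
              rw [if_neg (by simp)]
              have h3 : headOdd (b :: t') = false := by simp only [headOdd]; rw [hb]; rfl
              rw [h3, Bool.not_false, Bool.and_true]
            | false =>
              rw [if_pos (by simp)]
              have h3 : headOdd (b :: t') = true := by simp only [headOdd]; rw [hb]; rfl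
              rw [h3, Bool.not_true, Bool.and_false]
        rw [hx']
        simp
  
theorem loopB_eq (l : List Char) : ∀ (c : Int) (p : Bool),
    loopB l c p
      = (if adjOKf l p then (c + (l.countP (fun ch => pvEVEN.contains ch) : Int)) == 3 else false) := by
  induction l with
  | nil => intro c p; simp [loopB, adjOKf]
  | cons x t ih =>
    intro c p
    rw [loopB_cons, adjOKf_cons, List.countP_cons]
    cases hx : pvEVEN.contains x with
    | true =>
      rw [if_pos rfl, if_pos rfl, ih (c + 1) false]
      have harith : c + 1 + (t.countP (fun ch => pvEVEN.contains ch) : Int)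
          = c + ((t.countP (fun ch => pvEVEN.contains ch)
              + if true = true then 1 else 0 : Nat) : Int) := by
        rw [if_pos rfl]; push_cast; ring
      rw [harith]
    | false =>
      rw [if_neg (show ¬(false = true) by simp), if_neg (show ¬(false = true) by simp)]
      have hcnt : (t.countP (fun ch => pvEVEN.contains ch) + if false = true then 1 else 0)
          = t.countP (fun ch => pvEVEN.contains ch) := by simp
      rw [hcnt]
      cases p with
      | true => simp
      | false => simp [ih c true]

-- ===== VERDICT (by name: the statement is the Claim_ definition above) =====
theorem check_spec : Claim_equal_check := by
  intro s _ hpre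
  unfold Spec_check check check_alt
  have hne : s.toList ≠ [] := by
    intro h
    exact hpre (by cases s; simp_all)
  rcases hl : s.toList with _ | ⟨c0, t⟩
  · exact absurd hl hne
  have hget : PySem.Str.pyGet? s 0 = some c0 := by
    simp [PySem.Str.pyGet?_natCast, hl]
  rw [hget]
  by_cases h0 : c0 = '0'
  · simp [h0]
  · simp only [h0, if_neg, if_false]
    have hadj := adjA_drop (c0 :: t) 0
    simp only [Nat.cast_zero, List.drop_zero] at hadj
    rw [hadj, loopB_eq (c0 :: t) 0 false, adjOKf_eq]
    simp
    congr 2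
    have hcnt := countA_eq (c0 :: t)
    simp only [PySem.List.count_eq] at hcnt
    rw [hcnt]
    simp
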